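-- pv_equiv track=rewrite | github.com/drumil-2002/Quine-McClusky-GUI | QM_GUI.py | find_minterms
-- ===== SOURCE A (Python) =====
-- def find_minterms(term):
--     gaps = term.count('-')
--     if gaps == 0:
--         return [str(int(term, 2))]
--     replacements = [bin(i)[2:].zfill(gaps) for i in range(2**gaps)]
--     results = []
--     for replacement in replacements:
--         temp = term
--         for bit in replacement:
--             temp = temp.replace('-', bit, 1)
--         results.append(str(int(temp, 2)))
--     return results
-- ===== SOURCE B (Python) =====
-- def find_minterms(term):
--     # Expand arithmetically: the value with every dash read as 0, plus, for
--     # each subset of dashes, the positional weights of the dashes set to 1.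
--     # The leftmost dash is the most significant choice, so doubling the value
--     # list weight by weight yields the minterms in binary counting order.
--     n = len(term)
--     base = int(''.join('0' if ch == '-' else ch for ch in term), 2)
--     weights = [2 ** (n - 1 - p) for p, ch in enumerate(term) if ch == '-']
--     values = [base]
--     for w in weights:
--         values = [v for u in values for v in (u, u + w)]
--     return [str(v) for v in values]
-- ===== Notes on version B (the rewrite author's own statement) =====
-- stated objective: alternative
-- what changed: Instead of enumerating all 2^gaps zero-padded bit strings and substituting each into the term with repeated replace-first-dash string operations, B computes once the base value (every dash read as 0) and the positional weight of each dash, then doubles the value list weight by weight (v -> v, v+w), producing the minterms purely arithmetically in counting order; Pre_ excludes strings with int()-ignorable characters (underscores, trailing whitespace) on which A still returns but B's positional dash weights count those characters.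
-- outside the precondition, e.g. on find_minterms('-_1'): A returns ['1', '3'], B returns ['1', '5']; on find_minterms('1- '): A returns ['2', '3'], B returns ['2', '4']
import Mathlib
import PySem

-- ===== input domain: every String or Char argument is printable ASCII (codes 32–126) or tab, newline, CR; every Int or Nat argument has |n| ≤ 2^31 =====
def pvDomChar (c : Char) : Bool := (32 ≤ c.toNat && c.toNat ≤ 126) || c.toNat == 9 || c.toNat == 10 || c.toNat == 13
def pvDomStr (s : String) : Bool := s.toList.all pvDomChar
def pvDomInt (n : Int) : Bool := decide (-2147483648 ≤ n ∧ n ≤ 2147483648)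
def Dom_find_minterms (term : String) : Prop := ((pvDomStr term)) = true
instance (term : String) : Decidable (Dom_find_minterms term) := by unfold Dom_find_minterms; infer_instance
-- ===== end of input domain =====

-- B replaces A's enumerate-all-bit-strings-and-substitute expansion by a single left-to-right
-- pass over the term that branches the list of partial values at each dash (objective: alternative).

-- ===== PORT A =====
-- `temp.replace('-', bit, 1)`: ported by hand (PySem.Str.replace has no count argument);
-- replaces the first '-' only, exactly as Python's count-1 replace does for a 1-char pattern.
def replaceFirstDash : List Char → Char → List Char
  | [], _ => []
  | c :: t, b => if c = '-' then b :: t else c :: replaceFirstDash t b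

-- `int(s, 2)`: ported by hand as the plain binary-digit fold; exact for nonempty strings of
-- '0'/'1' — the only strings A applies it to on inputs satisfying Pre_find_minterms.
def intBin (cs : List Char) : Int := cs.foldl (fun a c => 2 * a + (if c = '1' then 1 else 0)) 0

def find_minterms (term : String) : List String :=
  let gaps : Nat := PySem.Str.count term "-"
  if gaps = 0 then [PySem.Int.toStr (intBin term.toList)]
  else
    -- bin(i)[2:].zfill(gaps): PySem.Int.toBinChars i = bin(i)[2:] for the 0 ≤ i of this range
    let replacements := (PySem.List.pyRange 0 ((2 : Int) ^ gaps) 1).map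
      (fun i => PySem.Chars.zfill (PySem.Int.toBinChars i) (gaps : Int))
    replacements.map (fun rep => PySem.Int.toStr (intBin (rep.foldl replaceFirstDash term.toList)))

-- ===== PORT B =====
-- `enumerate(term)` is ported with `zipIdx` ((char, index) pairs, indices 0.. — exact here,
-- Python's enumerate yields the same nonnegative indices); `int(s, 2)` is `intBin` as in port A.
def find_minterms_alt (term : String) : List String :=
  let cs := term.toList
  let n := cs.length
  let base := intBin (cs.map (fun ch => if ch = '-' then '0' else ch))
  let weights := cs.zipIdx.filterMap
    (fun cp => if cp.1 = '-' then some ((2 : Int) ^ (n - 1 - cp.2)) else none)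
  (weights.foldl (fun values w => values.flatMap (fun u => [u, u + w])) [base]).map
    PySem.Int.toStr

-- ===== PRECONDITION & SPEC =====
-- Pre_ admits optional leading whitespace and an optional '+', then a nonempty string over
-- '0','1','-' (the Quine–McCluskey term alphabet, where int(temp, 2) always succeeds);
-- A also happens to return on strings with int()-ignorable characters after a digit or dash
-- (underscores, trailing whitespace), which B's positional dash weights count.
def pvPreTail (l : List Char) : Bool :=
  !l.isEmpty && l.all (fun c => c == '0' || c == '1' || c == '-')
def Pre_find_minterms (term : String) : Prop :=
  (match term.toList.dropWhile
      (fun c => c == ' ' || c == '\t' || c == '\n' || c == '\r') with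
   | '+' :: r => pvPreTail r
   | r => pvPreTail r) = true
instance (term : String) : Decidable (Pre_find_minterms term) := by
  unfold Pre_find_minterms; infer_instance
def pvWitness_find_minterms : String := "1-0-"

def Spec_find_minterms (term : String) (out : List String) : Prop := out = find_minterms_alt term
instance (term : String) (out : List String) : Decidable (Spec_find_minterms term out) := by unfold Spec_find_minterms; infer_instance

-- ===== CLAIM (what is proved, stated in full; the proofs are below) =====
def Claim_equal_find_minterms : Prop := ∀ (term : String), Dom_find_minterms term → Pre_find_minterms term → Spec_find_minterms term (find_minterms term)

-- ===== LEMMAS AND PROOFS =====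

theorem pv_count_go (c : Char) :
    ∀ (l : List Char) (fuel acc : Nat), l.length ≤ fuel →
      PySem.Chars.count.go [c] fuel l acc = acc + l.count c := by
  intro l
  induction l with
  | nil => intro fuel acc _; cases fuel <;> simp [PySem.Chars.count.go]
  | cons h t ih =>
    intro fuel acc hle
    cases fuel with
    | zero => simp at hle
    | succ f =>
      rw [PySem.Chars.count.go]
      have hlf : t.length ≤ f := by simpa using hle
      by_cases hc : c = h
      · subst hc
        simp [List.isPrefixOf, ih f (acc + 1) hlf]
        omega
      · simp [List.isPrefixOf, hc, ih f acc hlf, Ne.symm hc]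

theorem pv_str_count (s : String) :
    PySem.Str.count s "-" = s.toList.count '-' := by
  have h : "-".toList = ['-'] := by decide
  rw [PySem.Str.count, h, PySem.Chars.count]
  have hg := pv_count_go '-' s.toList s.toList.length 0 le_rfl
  rw [show s.toList.length = s.length from String.length_toList] at hg
  simp [hg]

/-- The binary digit character of `n % 2`. -/
def pvDig (n : Nat) : Char := if n % 2 = 1 then '1' else '0'

/-- `bin(n)[2:]` for `n ≥ 0`, in recursive form. -/
def pvPbd (n : Nat) : List Char :=
  if n < 2 then [pvDig n] else pvPbd (n / 2) ++ [pvDig n]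
decreasing_by exact Nat.div_lt_self (by omega) (by omega)

theorem pv_toDigitsCore (f : Nat) :
    ∀ (n : Nat) (l : List Char), n < f →
      Nat.toDigitsCore 2 f n l = pvPbd n ++ l := by
  induction f with
  | zero => intro n l h; omega
  | succ f ih =>
    intro n l h
    rw [Nat.toDigitsCore]
    have hd : Nat.digitChar (n % 2) = pvDig n := by
      rcases Nat.mod_two_eq_zero_or_one n with h2 | h2 <;> simp [Nat.digitChar, pvDig, h2]
    by_cases h0 : n / 2 = 0
    · rw [pvPbd]
      have : n < 2 := by omega
      simp [this, h0, hd]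
    · rw [pvPbd]
      have : ¬ n < 2 := by omega
      simp [this, h0, hd, ih (n / 2) _ (by omega)]

theorem pv_toDigits_eq (n : Nat) : Nat.toDigits 2 n = pvPbd n := by
  simpa using pv_toDigitsCore (n + 1) n [] (by omega)

theorem pv_pbd_chars (n : Nat) : ∀ c ∈ pvPbd n, c = '0' ∨ c = '1' := by
  induction n using Nat.strong_induction_on with
  | _ n ih =>
    rw [pvPbd]
    by_cases h : n < 2
    · simp [h, pvDig]
      omega
    · simp [h]
      intro c hc
      rcases hc with hc | hc
      · exact ih (n / 2) (Nat.div_lt_self (by omega) (by omega)) c hc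
      · simp [pvDig] at hc
        split at hc <;> simp [hc]

theorem pv_pbd_ne_nil (n : Nat) : pvPbd n ≠ [] := by
  rw [pvPbd]; split <;> simp

theorem pv_zfill_eq (cs : List Char) (g : Nat) (h : cs ≠ [])
    (hc : ∀ c ∈ cs, c = '0' ∨ c = '1') :
    PySem.Chars.zfill cs (g : Int) = List.replicate (g - cs.length) '0' ++ cs := by
  simp only [PySem.Chars.zfill]
  by_cases hle : (g : Int) ≤ cs.length
  · have : g - cs.length = 0 := by omega
    simp [hle, this]
  · cases cs with
    | nil => simp at h
    | cons c t =>
      have hc0 : ¬ (c = '+' ∨ c = '-') := by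
        rcases hc c (by simp) with h1 | h1 <;> simp [h1]
      simp only [hle, hc0, if_false]
      simp

/-- The exact `g`-bit big-endian representation of `j`. -/
def pvBits : Nat → Nat → List Char
  | 0, _ => []
  | g + 1, j => pvBits g (j / 2) ++ [pvDig j]

/-- All `g`-bit strings in counting order. -/
def pvAll : Nat → List (List Char)
  | 0 => [[]]
  | g + 1 => (pvAll g).map ('0' :: ·) ++ (pvAll g).map ('1' :: ·)

theorem pv_bits_zero (g : Nat) : pvBits g 0 = List.replicate g '0' := by
  induction g with
  | zero => rfl
  | succ g ih =>
    rw [show pvBits (g + 1) 0 = pvBits g 0 ++ [pvDig 0] from rfl, ih]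
    rw [List.replicate_succ']
    rfl

theorem pv_zfill_pbd (g : Nat) : ∀ j, j < 2 ^ (g + 1) →
    List.replicate (g + 1 - (pvPbd j).length) '0' ++ pvPbd j = pvBits (g + 1) j := by
  induction g with
  | zero =>
    intro j hj
    interval_cases j <;> rw [pvPbd] <;> norm_num [pvBits, pvDig]
  | succ g ih =>
    intro j hj
    by_cases h2 : j < 2
    · have hp : pvPbd j = [pvDig j] := by rw [pvPbd]; simp [h2]
      have hd2 : j / 2 = 0 := by omega
      rw [hp, show pvBits (g + 1 + 1) j = pvBits (g + 1) (j / 2) ++ [pvDig j] from rfl,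
        hd2, pv_bits_zero]
      simp [List.replicate_succ']
    · have hp : pvPbd j = pvPbd (j / 2) ++ [pvDig j] := by
        rw [pvPbd]; simp [h2]
      have hrec := ih (j / 2) (by omega)
      rw [hp, show pvBits (g + 1 + 1) j = pvBits (g + 1) (j / 2) ++ [pvDig j] from rfl, ← hrec]
      have : g + 1 + 1 - (pvPbd (j / 2) ++ [pvDig j]).length
           = g + 1 - (pvPbd (j / 2)).length := by simp
      rw [this]
      simp

theorem pv_bits_lo (g : Nat) : ∀ j, j < 2 ^ g → pvBits (g + 1) j = '0' :: pvBits g j := by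
  induction g with
  | zero => intro j hj; interval_cases j; rfl
  | succ g ih =>
    intro j hj
    rw [show pvBits (g + 1 + 1) j = pvBits (g + 1) (j / 2) ++ [pvDig j] from rfl,
      ih (j / 2) (by omega)]
    rfl

theorem pv_bits_hi (g : Nat) : ∀ j, j < 2 ^ g → pvBits (g + 1) (2 ^ g + j) = '1' :: pvBits g j := by
  induction g with
  | zero => intro j hj; interval_cases j; rfl
  | succ g ih =>
    intro j hj
    have h1 : (2 ^ (g + 1) + j) / 2 = 2 ^ g + j / 2 := by
      rw [pow_succ]; omega
    have h2 : (2 ^ (g + 1) + j) % 2 = j % 2 := by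
      rw [pow_succ]; omega
    rw [show pvBits (g + 1 + 1) (2 ^ (g + 1) + j)
        = pvBits (g + 1) ((2 ^ (g + 1) + j) / 2) ++ [pvDig (2 ^ (g + 1) + j)] from rfl,
      h1, ih (j / 2) (by omega)]
    simp [pvDig, h2, pvBits]

theorem pv_range_bits (g : Nat) :
    (List.range (2 ^ g)).map (pvBits g) = pvAll g := by
  induction g with
  | zero => rfl
  | succ g ih =>
    have hsplit : (2 : Nat) ^ (g + 1) = 2 ^ g + 2 ^ g := by rw [pow_succ]; omega
    rw [hsplit, List.range_add, List.map_append, List.map_map, pvAll]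
    congr 1
    · rw [← ih, List.map_map]
      exact List.map_congr_left fun j hj => by
        simp only [Function.comp_apply]
        rw [pv_bits_lo g j (List.mem_range.mp hj)]
    · rw [← ih, List.map_map]
      exact List.map_congr_left fun j hj => by
        simp only [Function.comp_apply]
        rw [pv_bits_hi g j (List.mem_range.mp hj)]

def pvStep (a : Int) (c : Char) : Int := 2 * a + (if c = '1' then 1 else 0)

/-- The list of values A produces for the term suffix `cs` given accumulated high bits `a`. -/
def pvAvals (cs : List Char) (a : Int) : List Int :=
  (pvAll (cs.count '-')).map (fun bs => (bs.foldl replaceFirstDash cs).foldl pvStep a)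

theorem pv_rfd_cons (c : Char) (hc : c ≠ '-') :
    ∀ (bs cs : List Char),
      bs.foldl replaceFirstDash (c :: cs) = c :: bs.foldl replaceFirstDash cs := by
  intro bs
  induction bs with
  | nil => intro cs; rfl
  | cons b bs ih =>
    intro cs
    simp only [List.foldl_cons, replaceFirstDash, hc, if_false]
    exact ih (replaceFirstDash cs b)

theorem pv_avals_dash (cs : List Char) (a : Int) :
    pvAvals ('-' :: cs) a = pvAvals cs (2 * a) ++ pvAvals cs (2 * a + 1) := by
  simp only [pvAvals, List.count_cons_self, pvAll, List.map_append, List.map_map]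
  congr 1
  · refine List.map_congr_left fun bs hbs => ?_
    simp only [Function.comp_apply, List.foldl_cons]
    rw [show replaceFirstDash ('-' :: cs) '0' = '0' :: cs from by simp [replaceFirstDash],
      pv_rfd_cons '0' (by decide) bs cs, List.foldl_cons]
    simp [pvStep]
  · refine List.map_congr_left fun bs hbs => ?_
    simp only [Function.comp_apply, List.foldl_cons]
    rw [show replaceFirstDash ('-' :: cs) '1' = '1' :: cs from by simp [replaceFirstDash],
      pv_rfd_cons '1' (by decide) bs cs, List.foldl_cons]
    simp [pvStep]

theorem pv_avals_cons (c : Char) (hc : c ≠ '-') (cs : List Char) (a : Int) :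
    pvAvals (c :: cs) a = pvAvals cs (pvStep a c) := by
  have hcount : (c :: cs).count '-' = cs.count '-' := by
    simp [hc]
  simp only [pvAvals, hcount]
  refine List.map_congr_left fun bs hbs => ?_
  rw [pv_rfd_cons c hc bs cs, List.foldl_cons]

/-- Dash-subset doubling step of B. -/
def pvStepW (vs : List Int) (w : Int) : List Int := vs.flatMap (fun u => [u, u + w])

/-- B's dash-weight list, recursively: weight of a dash = 2 ^ (length of the rest). -/
def pvW : List Char → List Int
  | [] => []
  | c :: t => (if c = '-' then [(2 : Int) ^ t.length] else []) ++ pvW t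

theorem pv_weights_eq (cs : List Char) : ∀ (k n : Nat), n = k + cs.length →
    (cs.zipIdx k).filterMap
      (fun cp => if cp.1 = '-' then some ((2 : Int) ^ (n - 1 - cp.2)) else none)
    = pvW cs := by
  induction cs with
  | nil => intro k n _; rfl
  | cons c t ih =>
    intro k n hn
    rw [List.zipIdx_cons, List.filterMap_cons, ih (k + 1) n (by simp at hn ⊢; omega), pvW]
    have hexp : n - 1 - k = t.length := by simp at hn; omega
    by_cases hc : c = '-' <;> simp [hc, hexp]

theorem pv_stepW_append (ws : List Int) :
    ∀ vs1 vs2 : List Int,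
      ws.foldl pvStepW (vs1 ++ vs2) = ws.foldl pvStepW vs1 ++ ws.foldl pvStepW vs2 := by
  induction ws with
  | nil => intro vs1 vs2; rfl
  | cons w ws ih =>
    intro vs1 vs2
    simp only [List.foldl_cons]
    rw [show pvStepW (vs1 ++ vs2) w = pvStepW vs1 w ++ pvStepW vs2 w from by
      simp [pvStepW]]
    exact ih _ _

theorem pv_foldl_step (cs : List Char) :
    ∀ a : Int, cs.foldl pvStep a = a * 2 ^ cs.length + cs.foldl pvStep 0 := by
  induction cs with
  | nil => intro a; simp
  | cons c t ih =>
    intro a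
    simp only [List.foldl_cons]
    rw [ih (pvStep a c), ih (pvStep 0 c)]
    simp only [pvStep, List.length_cons]
    ring

theorem pv_intBin_map (cs : List Char) :
    ∀ a : Int,
      (cs.map (fun ch => if ch = '-' then '0' else ch)).foldl pvStep a
      = cs.foldl pvStep a := by
  induction cs with
  | nil => intro a; rfl
  | cons c t ih =>
    intro a
    by_cases hc : c = '-' <;> simp [hc, ih, pvStep]

theorem pv_bvals (cs : List Char) :
    ∀ a : Int, (pvW cs).foldl pvStepW [cs.foldl pvStep a] = pvAvals cs a := by
  induction cs with
  | nil => intro a; simp [pvW, pvAvals, pvAll]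
  | cons c t ih =>
    intro a
    by_cases hc : c = '-'
    · subst hc
      rw [pv_avals_dash]
      have hw : pvW ('-' :: t) = (2 : Int) ^ t.length :: pvW t := by simp [pvW]
      simp only [List.foldl_cons, hw]
      rw [show pvStep a '-' = 2 * a from by simp [pvStep]]
      have harith : t.foldl pvStep (2 * a) + 2 ^ t.length = t.foldl pvStep (2 * a + 1) := by
        rw [pv_foldl_step t (2 * a), pv_foldl_step t (2 * a + 1)]; ring
      rw [show pvStepW [t.foldl pvStep (2 * a)] ((2 : Int) ^ t.length)
          = [t.foldl pvStep (2 * a)] ++ [t.foldl pvStep (2 * a + 1)] from by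
        simp only [pvStepW, List.flatMap_cons, List.flatMap_nil, List.append_nil]
        rw [harith]
        rfl]
      rw [pv_stepW_append, ih (2 * a), ih (2 * a + 1)]
    · rw [show pvW (c :: t) = pvW t from by simp [pvW, hc], List.foldl_cons,
        ih (pvStep a c), pv_avals_cons c hc]

theorem pv_alt_eq (term : String) :
    find_minterms_alt term = (pvAvals term.toList 0).map PySem.Int.toStr := by
  rw [show find_minterms_alt term
      = ((term.toList.zipIdx.filterMap
            (fun cp => if cp.1 = '-' then some ((2 : Int) ^ (term.toList.length - 1 - cp.2))
                       else none)).foldl pvStepW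
          [(term.toList.map (fun ch => if ch = '-' then '0' else ch)).foldl pvStep 0]).map
        PySem.Int.toStr from rfl]
  rw [pv_weights_eq term.toList 0 term.toList.length (by simp),
    pv_intBin_map term.toList 0, pv_bvals term.toList 0]

theorem pv_final (term : String) : find_minterms term = find_minterms_alt term := by
  have halt := pv_alt_eq term
  rw [find_minterms, pv_str_count term]
  set cs := term.toList with hcs
  by_cases h0 : cs.count '-' = 0
  · rw [halt]
    simp only [h0, if_true]
    rw [pvAvals, h0]
    simp [pvAll, intBin]
    rfl
  · rw [if_neg h0, halt]
    have hg : ∃ g, cs.count '-' = g + 1 := ⟨cs.count '-' - 1, by omega⟩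
    obtain ⟨g, hg⟩ := hg
    rw [PySem.List.pyRange_one]
    have hpow : (((2 : Int) ^ (cs.count '-') - 0)).toNat = 2 ^ (cs.count '-') := by
      rw [sub_zero]
      rw [show ((2:Int) ^ cs.count '-') = ((2 ^ cs.count '-' : Nat) : Int) by push_cast; ring]
      exact Int.toNat_natCast _
    rw [hpow, List.map_map, List.map_map]
    rw [pvAvals, ← pv_range_bits, List.map_map, List.map_map]
    refine List.map_congr_left fun k hk => ?_
    have hk' : k < 2 ^ cs.count '-' := List.mem_range.mp hk
    simp only [Function.comp_apply, zero_add]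
    have htb : PySem.Int.toBinChars (k : Int) = pvPbd k := by
      rw [PySem.Int.toBinChars]
      simp [pv_toDigits_eq]
    rw [htb, pv_zfill_eq (pvPbd k) (cs.count '-') (pv_pbd_ne_nil k) (pv_pbd_chars k)]
    rw [hg] at hk' ⊢
    rw [pv_zfill_pbd g k hk']
    rfl

-- ===== VERDICT (by name: the statement is the Claim_ definition above) =====
theorem find_minterms_spec : Claim_equal_find_minterms := by
  intro term _ _
  exact pv_final term
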